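-- pv_equiv track=rewrite | github.com/s-yoseph/demo | .github/scripts/auto_release.py | determine_bump
-- ===== SOURCE A (Python) =====
-- def determine_bump(labels):
--     labels = [l.lower() for l in labels]
--     if "major" in labels:
--         return "major"
--     if "enhancement" in labels or "feature" in labels:
--         return "minor"
--     if "bug" in labels or "fix" in labels:
--         return "patch"
--     return "patch"
-- ===== SOURCE B (Python) =====
-- _RANK = {"major": 3, "enhancement": 2, "feature": 2, "bug": 1, "fix": 1}
--
-- def determine_bump(labels):
--     best = 0
--     for l in labels:
--         best = max(best, _RANK.get(l.lower(), 0))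
--     if best == 3:
--         return "major"
--     if best == 2:
--         return "minor"
--     return "patch"
-- ===== Notes on version B (the rewrite author's own statement) =====
-- stated objective: alternative
-- what changed: Replaces the ordered sequence of list-membership checks over a rebuilt lowercased list with a single accumulating pass taking the maximum numeric rank of each label, then mapping the max rank to the bump level.
import Mathlib
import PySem

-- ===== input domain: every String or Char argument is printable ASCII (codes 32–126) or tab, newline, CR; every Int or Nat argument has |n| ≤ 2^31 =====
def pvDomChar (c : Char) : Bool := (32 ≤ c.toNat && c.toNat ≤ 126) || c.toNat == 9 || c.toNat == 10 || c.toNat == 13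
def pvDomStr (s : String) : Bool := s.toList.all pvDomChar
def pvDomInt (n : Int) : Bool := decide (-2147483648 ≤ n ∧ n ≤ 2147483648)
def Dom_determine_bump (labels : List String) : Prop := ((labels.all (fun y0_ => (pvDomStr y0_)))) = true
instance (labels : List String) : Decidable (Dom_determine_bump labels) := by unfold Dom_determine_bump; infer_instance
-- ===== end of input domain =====

-- B: one accumulating max-rank pass over the labels instead of A's ordered membership checks; alternative decomposition, same cost.
-- ===== PORT A =====
def determine_bump (labels : List String) : String :=
  let labels := labels.map PySem.Str.lower
  if labels.contains "major" then "major"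
  else if labels.contains "enhancement" || labels.contains "feature" then "minor"
  else if labels.contains "bug" || labels.contains "fix" then "patch"
  else "patch"

-- ===== PORT B =====
def pvRankDict : PySem.Dict String Int :=
  PySem.Dict.ofList [("major", 3), ("enhancement", 2), ("feature", 2), ("bug", 1), ("fix", 1)]

def determine_bump_alt (labels : List String) : String :=
  let best : Int := labels.foldl (fun b l => max b (PySem.Dict.getD pvRankDict (PySem.Str.lower l) 0)) 0
  if best = 3 then "major"
  else if best = 2 then "minor"
  else "patch"

-- ===== PRECONDITION & SPEC =====
def Spec_determine_bump (labels : List String) (out : String) : Prop := out = determine_bump_alt labels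
instance (labels : List String) (out : String) : Decidable (Spec_determine_bump labels out) := by unfold Spec_determine_bump; infer_instance

-- ===== CLAIM (what is proved, stated in full; the proofs are below) =====
def Claim_equal_determine_bump : Prop := ∀ (labels : List String), Dom_determine_bump labels → Spec_determine_bump labels (determine_bump labels)

-- ===== LEMMAS AND PROOFS =====

def pvRank (s : String) : Int := PySem.Dict.getD pvRankDict s 0

theorem pvRankDict_mk : pvRankDict =
    PySem.Dict.mk [("major", 3), ("enhancement", 2), ("feature", 2), ("bug", 1), ("fix", 1)] := by
  decide

theorem pvRank_cases (s : String) :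
    (pvRank s = 3 ↔ s = "major") ∧
    (pvRank s = 2 ↔ (s = "enhancement" ∨ s = "feature")) ∧
    (0 ≤ pvRank s ∧ pvRank s ≤ 3) := by
  by_cases h1 : s = "major"
  · subst h1; decide
  by_cases h2 : s = "enhancement"
  · subst h2; decide
  by_cases h3 : s = "feature"
  · subst h3; decide
  by_cases h4 : s = "bug"
  · subst h4; decide
  by_cases h5 : s = "fix"
  · subst h5; decide
  have e : pvRank s = 0 := by
    simp [pvRank, pvRankDict_mk, PySem.Dict.getD, PySem.Dict.get?,
      Ne.symm h1, Ne.symm h2, Ne.symm h3, Ne.symm h4, Ne.symm h5]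
  simp [e, h1, h2, h3]

def pvM (L : List String) : Int := L.foldl (fun b l => max b (pvRank l)) 0

theorem pvFold_shift (L : List String) (b : Int) (hb : 0 ≤ b) :
    L.foldl (fun b l => max b (pvRank l)) b = max b (pvM L) := by
  induction L generalizing b with
  | nil => simp [pvM]; omega
  | cons x xs ih =>
    have hr := (pvRank_cases x).2.2
    simp only [pvM, List.foldl_cons]
    rw [ih _ (by omega), ih _ (by omega)]
    omega

theorem pvM_cons (x : String) (xs : List String) :
    pvM (x :: xs) = max (pvRank x) (pvM xs) := by
  have hr := (pvRank_cases x).2.2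
  simp only [pvM, List.foldl_cons]
  rw [pvFold_shift _ _ (by omega), pvFold_shift _ _ le_rfl]
  omega

theorem pvM_char (L : List String) :
    (pvM L = 3 ↔ "major" ∈ L) ∧
    (pvM L = 2 ↔ ("major" ∉ L ∧ ("enhancement" ∈ L ∨ "feature" ∈ L))) ∧
    (0 ≤ pvM L ∧ pvM L ≤ 3) := by
  induction L with
  | nil => simp [pvM]
  | cons x xs ih =>
    obtain ⟨h1, h2, h3⟩ := ih
    obtain ⟨r1, r2, r3⟩ := pvRank_cases x
    rw [pvM_cons]
    by_cases e1 : x = "major" <;> by_cases e2 : x = "enhancement" <;>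
      by_cases e3 : x = "feature" <;> by_cases m1 : "major" ∈ xs <;>
      by_cases m2 : "enhancement" ∈ xs <;> by_cases m3 : "feature" ∈ xs <;>
      simp_all [List.mem_cons, eq_comm] <;> omega

-- ===== VERDICT (by name: the statement is the Claim_ definition above) =====
theorem determine_bump_spec : Claim_equal_determine_bump := by
  intro labels _
  unfold Spec_determine_bump determine_bump determine_bump_alt
  simp only []
  set L := labels.map PySem.Str.lower with hL
  have hfold : labels.foldl (fun b l => max b (PySem.Dict.getD pvRankDict (PySem.Str.lower l) 0)) 0 = pvM L := by
    simp only [pvM, hL, List.foldl_map]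
    rfl
  rw [hfold]
  obtain ⟨h1, h2, h3⟩ := pvM_char L
  by_cases hmaj : "major" ∈ L
  · have h3' : pvM L = 3 := h1.mpr hmaj
    simp [hmaj, h3']
  · have hne3 : pvM L ≠ 3 := fun hc => hmaj (h1.mp hc)
    by_cases hmin : "enhancement" ∈ L ∨ "feature" ∈ L
    · have h2' : pvM L = 2 := h2.mpr ⟨hmaj, hmin⟩
      rcases hmin with h | h <;> simp [hmaj, h, h2']
    · have hne2 : pvM L ≠ 2 := fun hc => hmin (h2.mp hc).2
      rw [not_or] at hmin
      obtain ⟨he, hf⟩ := hmin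
      by_cases hbug : "bug" ∈ L <;> by_cases hfix : "fix" ∈ L <;>
        simp [hmaj, he, hf, hbug, hfix, hne3, hne2]
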